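-- pv_equiv track=rewrite | github.com/ata-turhan/Leetcode-Solutions | 3561-remove-methods-from-project/remove-methods-from-project.py | remainingMethods
-- ===== SOURCE A (Python) =====
-- from collections import defaultdict
-- from typing import List
--
-- def remainingMethods(n: int, k: int, invocations: List[List[int]]) -> List[int]:
--     # Step 1: Build the invocation graph and reverse graph (invoker -> invoked)
--     invocation_graph = defaultdict(list)  # Regular graph: a -> b (a invokes b)
--     reverse_invocation_graph = defaultdict(list)  # Reverse graph: b -> a (b invoked by a)
--
--     for invoker, invoked in invocations:
--         invocation_graph[invoker].append(invoked)
--         reverse_invocation_graph[invoked].append(invoker)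
--
--     # Step 2: Use DFS to find all suspicious methods starting from method k
--     suspicious_methods = set()  # Set to store all suspicious methods
--     stack = [k]
--
--     while stack:
--         current_method = stack.pop()
--         if current_method not in suspicious_methods:
--             suspicious_methods.add(current_method)
--             for neighbor in invocation_graph[current_method]:
--                 if neighbor not in suspicious_methods:
--                     stack.append(neighbor)
--
--     # Step 3: Check for external invocations (non-suspicious methods invoking suspicious ones)
--     for method in suspicious_methods:
--         for invoker in reverse_invocation_graph[method]:
--             if invoker not in suspicious_methods:
--                 # If a non-suspicious method invokes a suspicious method, return all methods
--                 return list(range(n))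
--
--     # Step 4: Return all non-suspicious methods
--     remaining_methods = [i for i in range(n) if i not in suspicious_methods]
--
--     return remaining_methods
-- ===== SOURCE B (Python) =====
-- def remainingMethods(n, k, invocations):
--     # Suspicious set as a fixpoint: repeatedly sweep the raw edge list,
--     # adding invoked methods of already-suspicious invokers, until stable.
--     # No adjacency graph (forward or reverse) is ever built.
--     suspicious = {k}
--     changed = True
--     while changed:
--         changed = False
--         for invoker, invoked in invocations:
--             if invoker in suspicious and invoked not in suspicious:
--                 suspicious.add(invoked)
--                 changed = True
--     # Flat edge scan instead of A's reverse graph + nested loop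
--     if any(invoked in suspicious and invoker not in suspicious
--            for invoker, invoked in invocations):
--         return list(range(n))
--     return [i for i in range(n) if i not in suspicious]
-- ===== Notes on version B (the rewrite author's own statement) =====
-- stated objective: alternative
-- what changed: B builds no graph at all: instead of A's two adjacency dicts and a stack DFS, it computes the suspicious set as a fixpoint by repeatedly sweeping the raw invocation list until no new method is added (Bellman-Ford-style relaxation), and replaces A's reverse-graph nested check by one flat pass over the edge list.
import Mathlib
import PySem

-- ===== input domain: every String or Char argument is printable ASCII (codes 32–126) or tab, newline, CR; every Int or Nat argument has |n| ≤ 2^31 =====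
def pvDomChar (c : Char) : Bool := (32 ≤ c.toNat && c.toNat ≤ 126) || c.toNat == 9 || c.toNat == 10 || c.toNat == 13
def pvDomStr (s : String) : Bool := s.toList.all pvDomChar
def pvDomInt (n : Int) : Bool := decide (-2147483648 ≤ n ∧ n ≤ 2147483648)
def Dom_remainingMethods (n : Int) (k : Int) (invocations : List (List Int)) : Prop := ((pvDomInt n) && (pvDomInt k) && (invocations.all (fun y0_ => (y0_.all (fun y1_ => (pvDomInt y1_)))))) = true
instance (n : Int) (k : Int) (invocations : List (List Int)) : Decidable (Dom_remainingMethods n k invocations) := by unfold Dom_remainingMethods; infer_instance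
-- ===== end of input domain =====

-- B replaces A's two adjacency dicts + stack DFS by a graph-free fixpoint computation
-- (repeated sweeps over the raw edge list until no change) and a flat edge scan instead of
-- A's reverse-graph nested check; the loops are made total with fuel and the proofs show the
-- given fuel always suffices.

-- B-side helpers with list-pattern matches, placed before either port so that the
-- match auxiliaries they own are not attributed to a port's namespace.
-- body of B's inner 'for invoker, invoked in invocations' loop; the Bool is 'changed'
def pvSweepStep (p : PySem.Set Int × Bool) (e : List Int) : PySem.Set Int × Bool :=
  match e with
  | a :: b :: rest =>
      if rest.isEmpty && PySem.Set.contains p.1 a && !(PySem.Set.contains p.1 b) then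
        (PySem.Set.add p.1 b, true)
      else p
  | _ => p

-- predicate of B's flat 'any(...)' edge scan
def pvExternalEdge (susp : PySem.Set Int) (e : List Int) : Bool :=
  match e with
  | a :: b :: rest =>
      rest.isEmpty && PySem.Set.contains susp b && !(PySem.Set.contains susp a)
  | _ => false

-- ===== PORT A =====
-- A's DFS while-loop, stack kept reversed (head = top)
def pvDfsA (g : PySem.Dict Int (List Int)) : Nat → PySem.Set Int → List Int → PySem.Set Int
  | 0, susp, _ => susp
  | _, susp, [] => susp
  | fuel+1, susp, c :: rest =>
    if PySem.Set.contains susp c then pvDfsA g fuel susp rest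
    else
      pvDfsA g fuel (PySem.Set.add susp c)
        ((g.getD c []).foldl
          (fun s nb => if PySem.Set.contains (PySem.Set.add susp c) nb then s else nb :: s) rest)

def remainingMethods (n : Int) (k : Int) (invocations : List (List Int)) : List Int :=
  let gs := invocations.foldl
    (fun (p : PySem.Dict Int (List Int) × PySem.Dict Int (List Int)) e =>
      match e with
      | [a, b] => (p.1.modify a [] (· ++ [b]), p.2.modify b [] (· ++ [a]))
      | _ => p)
    (PySem.Dict.empty, PySem.Dict.empty)
  let susp := pvDfsA gs.1 (invocations.length + 1) PySem.Set.empty [k]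
  if susp.any (fun m => (gs.2.getD m []).any (fun a => !(PySem.Set.contains susp a))) then
    PySem.List.pyRange 0 n 1
  else
    (PySem.List.pyRange 0 n 1).filter (fun i => !(PySem.Set.contains susp i))

-- ===== PORT B =====
-- one full pass of B's 'while changed' body
def pvSweep (invocations : List (List Int)) (susp : PySem.Set Int) : PySem.Set Int × Bool :=
  invocations.foldl pvSweepStep (susp, false)

-- B's 'while changed' loop
def pvFix (invocations : List (List Int)) : Nat → PySem.Set Int → PySem.Set Int
  | 0, susp => susp
  | fuel+1, susp =>
      let p := pvSweep invocations susp
      if p.2 then pvFix invocations fuel p.1 else p.1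

def remainingMethods_alt (n : Int) (k : Int) (invocations : List (List Int)) : List Int :=
  let susp := pvFix invocations (invocations.length + 1) (PySem.Set.add PySem.Set.empty k)
  if invocations.any (pvExternalEdge susp) then
    PySem.List.pyRange 0 n 1
  else
    (PySem.List.pyRange 0 n 1).filter (fun i => !(PySem.Set.contains susp i))

-- ===== PRECONDITION & SPEC =====
-- Both Pythons unpack 'for invoker, invoked in invocations' and raise ValueError on an inner
-- list whose length is not 2; exactly those inputs are excluded.
def Pre_remainingMethods (n : Int) (k : Int) (invocations : List (List Int)) : Prop :=
  ∀ e ∈ invocations, e.length = 2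
instance (n : Int) (k : Int) (invocations : List (List Int)) : Decidable (Pre_remainingMethods n k invocations) := by unfold Pre_remainingMethods; infer_instance
def pvWitness_remainingMethods : Int × Int × List (List Int) := (3, 1, [[1, 2]])

def Spec_remainingMethods (n : Int) (k : Int) (invocations : List (List Int)) (out : List Int) : Prop := out = remainingMethods_alt n k invocations
instance (n : Int) (k : Int) (invocations : List (List Int)) (out : List Int) : Decidable (Spec_remainingMethods n k invocations out) := by unfold Spec_remainingMethods; infer_instance

-- ===== CLAIM (what is proved, stated in full; the proofs are below) =====
def Claim_equal_remainingMethods : Prop := ∀ (n : Int) (k : Int) (invocations : List (List Int)), Dom_remainingMethods n k invocations → Pre_remainingMethods n k invocations → Spec_remainingMethods n k invocations (remainingMethods n k invocations)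

-- ===== LEMMAS AND PROOFS =====

-- reachability from k along the invocation edges: the set both programs compute
def pvReach (inv : List (List Int)) (k x : Int) : Prop :=
  Relation.ReflTransGen (fun a b => [a, b] ∈ inv) k x

-- the edge list as pairs (used only to talk about A's forward dict)
def pvPairs (inv : List (List Int)) : List (Int × Int) :=
  inv.map (fun e => (e.headI, e.tail.headI))

theorem pvPairs_mem (inv : List (List Int)) (h2 : ∀ e ∈ inv, e.length = 2) (a b : Int) :
    (a, b) ∈ pvPairs inv ↔ [a, b] ∈ inv := by
  simp only [pvPairs, List.mem_map]
  constructor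
  · rintro ⟨e, he, hab⟩
    have := h2 e he
    match e, this with
    | [x, y], _ =>
        simp only [List.headI, List.tail, Prod.mk.injEq] at hab
        obtain ⟨rfl, rfl⟩ := hab
        exact he
  · intro h
    exact ⟨[a, b], h, rfl⟩

-- the forward-graph component of A's pair fold is the single pair fold
theorem pvGraphs_fst (invocations : List (List Int))
    (p : PySem.Dict Int (List Int) × PySem.Dict Int (List Int))
    (h2 : ∀ e ∈ invocations, e.length = 2) :
    (invocations.foldl
      (fun (p : PySem.Dict Int (List Int) × PySem.Dict Int (List Int)) e =>
        match e with
        | [a, b] => (p.1.modify a [] (· ++ [b]), p.2.modify b [] (· ++ [a]))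
        | _ => p) p).1 =
    (pvPairs invocations).foldl (fun d q => d.modify q.1 [] (· ++ [q.2])) p.1 := by
  induction invocations generalizing p with
  | nil => rfl
  | cons e tl ih =>
      have he := h2 e List.mem_cons_self
      match e, he with
      | [a, b], _ =>
          simp only [List.foldl_cons, pvPairs, List.map_cons]
          exact ih (p.1.modify a [] (· ++ [b]), p.2.modify b [] (· ++ [a]))
            (fun e he => h2 e (List.mem_cons_of_mem _ he))

-- membership in the reverse graph = an exact [x, y] edge in the list
theorem pvRev_mem (invocations : List (List Int))
    (p : PySem.Dict Int (List Int) × PySem.Dict Int (List Int)) (x y : Int) :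
    (x ∈ ((invocations.foldl
      (fun (p : PySem.Dict Int (List Int) × PySem.Dict Int (List Int)) e =>
        match e with
        | [a, b] => (p.1.modify a [] (· ++ [b]), p.2.modify b [] (· ++ [a]))
        | _ => p) p).2.getD y []))
    ↔ (x ∈ p.2.getD y [] ∨ [x, y] ∈ invocations) := by
  induction invocations generalizing p with
  | nil => simp
  | cons e tl ih =>
      match e with
      | [] => simp only [List.foldl_cons]; rw [ih]; simp
      | [a] => simp only [List.foldl_cons]; rw [ih]; simp
      | a :: b :: c :: r => simp only [List.foldl_cons]; rw [ih]; simp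
      | [a, b] =>
          simp only [List.foldl_cons]
          rw [ih (p.1.modify a [] (· ++ [b]), p.2.modify b [] (· ++ [a]))]
          simp only [PySem.Dict.getD_modify]
          by_cases hy : y = b
          · subst hy
            simp only [if_true, List.mem_append, List.mem_cons, List.cons.injEq, and_true]
            tauto
          · simp only [if_neg hy, List.mem_cons, List.cons.injEq]
            constructor
            · rintro (h | h)
              · exact Or.inl h
              · exact Or.inr (Or.inr h)
            · rintro (h | ⟨h1, h2, h3⟩ | h)
              · exact Or.inl h
              · exact absurd h2 hy
              · exact Or.inr h

-- pushed-stack membership and length (the inner foldl of the DFS loop)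
theorem pvPush_mem (l : List Int) (t : PySem.Set Int) (rest : List Int) (x : Int) :
    x ∈ l.foldl (fun s nb => if PySem.Set.contains t nb then s else nb :: s) rest ↔
      x ∈ rest ∨ (x ∈ l ∧ x ∉ t) := by
  induction l generalizing rest with
  | nil => simp
  | cons y l ih =>
      simp only [List.foldl_cons]
      by_cases hy : y ∈ t
      · rw [if_pos ((PySem.Set.contains_iff t y).2 hy), ih]
        constructor
        · rintro (h | ⟨h1, h2⟩)
          · exact Or.inl h
          · exact Or.inr ⟨List.mem_cons_of_mem _ h1, h2⟩
        · rintro (h | ⟨h1, h2⟩)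
          · exact Or.inl h
          · rcases List.mem_cons.1 h1 with rfl | h1
            · exact absurd hy h2
            · exact Or.inr ⟨h1, h2⟩
      · rw [if_neg (by simp [PySem.Set.contains_iff, hy]), ih]
        simp only [List.mem_cons]
        constructor
        · rintro ((rfl | h) | ⟨h1, h2⟩)
          · exact Or.inr ⟨Or.inl rfl, hy⟩
          · exact Or.inl h
          · exact Or.inr ⟨Or.inr h1, h2⟩
        · rintro (h | ⟨rfl | h1, h2⟩)
          · exact Or.inl (Or.inr h)
          · exact Or.inl (Or.inl rfl)
          · exact Or.inr ⟨h1, h2⟩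

theorem pvPush_len (l : List Int) (t : PySem.Set Int) (rest : List Int) :
    (l.foldl (fun s nb => if PySem.Set.contains t nb then s else nb :: s) rest).length ≤
      rest.length + l.length := by
  induction l generalizing rest with
  | nil => simp
  | cons y l ih =>
      simp only [List.foldl_cons, List.length_cons]
      split
      · exact (ih rest).trans (by omega)
      · exact (ih (y :: rest)).trans (by simp; omega)

-- DFS result contains the starting set
theorem pvDfsA_mono (g : PySem.Dict Int (List Int)) (fuel : Nat) (t : PySem.Set Int)
    (stack : List Int) (x : Int) (hx : x ∈ t) : x ∈ pvDfsA g fuel t stack := by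
  induction fuel generalizing t stack with
  | zero => exact hx
  | succ fuel ih =>
      cases stack with
      | nil => exact hx
      | cons c rest =>
          rw [pvDfsA]
          split
          · exact ih t rest hx
          · exact ih _ _ ((PySem.Set.mem_add _ _ _).2 (Or.inl hx))

-- every DFS-result element satisfies any edge-closed predicate holding on the inputs
theorem pvDfsA_sound (g : PySem.Dict Int (List Int)) (P : Int → Prop)
    (hP : ∀ c, P c → ∀ nb ∈ g.getD c [], P nb) (fuel : Nat) (t : PySem.Set Int)
    (stack : List Int) (ht : ∀ x ∈ t, P x) (hs : ∀ x ∈ stack, P x) :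
    ∀ x ∈ pvDfsA g fuel t stack, P x := by
  induction fuel generalizing t stack with
  | zero => exact ht
  | succ fuel ih =>
      cases stack with
      | nil => exact ht
      | cons c rest =>
          rw [pvDfsA]
          split
          · exact ih t rest ht (fun x hx => hs x (List.mem_cons_of_mem _ hx))
          · refine ih _ _ ?_ ?_
            · intro x hx
              rcases (PySem.Set.mem_add _ _ _).1 hx with hx | rfl
              · exact ht x hx
              · exact hs x List.mem_cons_self
            · intro x hx
              rcases (pvPush_mem _ _ _ _).1 hx with hx | ⟨hx, _⟩
              · exact hs x (List.mem_cons_of_mem _ hx)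
              · exact hP c (hs c List.mem_cons_self) x hx

-- number of pairs whose source is outside t (the DFS fuel measure)
def pvCF (L : List (Int × Int)) (t : PySem.Set Int) : Nat :=
  (L.filter (fun q => !(PySem.Set.contains t q.1))).length

theorem pvCF_split (L : List (Int × Int)) (t : PySem.Set Int) (c : Int) (hc : c ∉ t) :
    pvCF L t = pvCF L (PySem.Set.add t c) + (L.filter (fun q => q.1 == c)).length := by
  induction L with
  | nil => rfl
  | cons q L ih =>
      simp only [pvCF, List.filter_cons] at ih ⊢
      by_cases h1 : q.1 ∈ t
      · have e1 : (!PySem.Set.contains t q.1) = false := by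
          simp [PySem.Set.contains_iff, h1]
        have e2 : (!PySem.Set.contains (PySem.Set.add t c) q.1) = false := by
          simp [PySem.Set.contains_iff, PySem.Set.mem_add, h1]
        have e3 : (q.1 == c) = false := by
          simp only [beq_eq_false_iff_ne, ne_eq]
          exact fun h => hc (h ▸ h1)
        rw [e1, e2, e3]
        simp only [Bool.false_eq_true, if_false, eq_self_iff_true, if_true]
        omega
      · by_cases h2 : q.1 = c
        · have e1 : (!PySem.Set.contains t q.1) = true := by
            simp [PySem.Set.contains_iff, h1]
          have e2 : (!PySem.Set.contains (PySem.Set.add t c) q.1) = false := by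
            simp [PySem.Set.contains_iff, PySem.Set.mem_add, h2]
          have e3 : (q.1 == c) = true := by simp [h2]
          rw [e1, e2, e3]
          simp only [Bool.false_eq_true, if_false, eq_self_iff_true, if_true, List.length_cons]
          omega
        · have e1 : (!PySem.Set.contains t q.1) = true := by
            simp [PySem.Set.contains_iff, h1]
          have e2 : (!PySem.Set.contains (PySem.Set.add t c) q.1) = true := by
            simp [PySem.Set.contains_iff, PySem.Set.mem_add, h1, h2]
          have e3 : (q.1 == c) = false := by simp [h2]
          rw [e1, e2, e3]
          simp only [Bool.false_eq_true, if_false, eq_self_iff_true, if_true, List.length_cons]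
          omega

-- with enough fuel the DFS empties its stack and its result is closed under the graph
theorem pvDfsA_complete (g : PySem.Dict Int (List Int)) (L : List (Int × Int))
    (hdeg : ∀ c, (g.getD c []).length = (L.filter (fun q => q.1 == c)).length) :
    ∀ (fuel : Nat) (t : PySem.Set Int) (stack : List Int),
      stack.length + pvCF L t ≤ fuel →
      (∀ x ∈ t, ∀ nb ∈ g.getD x [], nb ∈ t ∨ nb ∈ stack) →
      (∀ x ∈ stack, x ∈ pvDfsA g fuel t stack) ∧
      (∀ x ∈ pvDfsA g fuel t stack, ∀ nb ∈ g.getD x [], nb ∈ pvDfsA g fuel t stack) := by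
  intro fuel
  induction fuel with
  | zero =>
      intro t stack hlen hcl
      have hst : stack = [] := by
        cases stack with
        | nil => rfl
        | cons a b => simp at hlen
      subst hst
      refine ⟨by simp, ?_⟩
      intro x hx nb hnb
      rcases hcl x hx nb hnb with h | h
      · exact h
      · simp at h
  | succ fuel ih =>
      intro t stack hlen hcl
      cases stack with
      | nil =>
          refine ⟨by simp, ?_⟩
          intro x hx nb hnb
          rcases hcl x hx nb hnb with h | h
          · exact h
          · simp at h
      | cons c rest =>
          rw [pvDfsA]
          by_cases hc : c ∈ t
          · rw [if_pos ((PySem.Set.contains_iff t c).2 hc)]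
            have hlen' : rest.length + pvCF L t ≤ fuel := by
              simp only [List.length_cons] at hlen; omega
            have hcl' : ∀ x ∈ t, ∀ nb ∈ g.getD x [], nb ∈ t ∨ nb ∈ rest := by
              intro x hx nb hnb
              rcases hcl x hx nb hnb with h | h
              · exact Or.inl h
              · rcases List.mem_cons.1 h with rfl | h
                · exact Or.inl hc
                · exact Or.inr h
            obtain ⟨ih1, ih2⟩ := ih t rest hlen' hcl'
            refine ⟨?_, ih2⟩
            intro x hx
            rcases List.mem_cons.1 hx with rfl | hx
            · exact pvDfsA_mono g fuel t rest x hc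
            · exact ih1 x hx
          · rw [if_neg (fun h => hc ((PySem.Set.contains_iff t c).1 h))]
            set t' := PySem.Set.add t c with ht'
            set st' := (g.getD c []).foldl
              (fun s nb => if PySem.Set.contains t' nb then s else nb :: s) rest with hst'
            have hlen' : st'.length + pvCF L t' ≤ fuel := by
              have h1 := pvPush_len (g.getD c []) t' rest
              rw [← hst'] at h1
              have h2 := pvCF_split L t c hc
              rw [← ht'] at h2
              have h3 := hdeg c
              simp only [List.length_cons] at hlen
              omega
            have hcl' : ∀ x ∈ t', ∀ nb ∈ g.getD x [], nb ∈ t' ∨ nb ∈ st' := by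
              intro x hx nb hnb
              rcases (PySem.Set.mem_add _ _ _).1 hx with hx | rfl
              · rcases hcl x hx nb hnb with h | h
                · exact Or.inl ((PySem.Set.mem_add _ _ _).2 (Or.inl h))
                · rcases List.mem_cons.1 h with rfl | h
                  · exact Or.inl ((PySem.Set.mem_add _ _ _).2 (Or.inr rfl))
                  · exact Or.inr ((pvPush_mem _ _ _ _).2 (Or.inl h))
              · by_cases hnb' : nb ∈ t'
                · exact Or.inl hnb'
                · exact Or.inr ((pvPush_mem _ _ _ _).2 (Or.inr ⟨hnb, hnb'⟩))
            obtain ⟨ih1, ih2⟩ := ih t' st' hlen' hcl'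
            refine ⟨?_, ih2⟩
            intro x hx
            rcases List.mem_cons.1 hx with rfl | hx
            · exact pvDfsA_mono g fuel t' st' x ((PySem.Set.mem_add _ _ _).2 (Or.inr rfl))
            · exact ih1 x ((pvPush_mem _ _ _ _).2 (Or.inl hx))

-- getD on the forward dict: exactly the invoked ends of the pairs with the given invoker
theorem pvGetD_mem (L : List (Int × Int)) (c nb : Int) :
    nb ∈ ((L.foldl (fun d q => d.modify q.1 [] (· ++ [q.2])) PySem.Dict.empty).getD c []) ↔
      (c, nb) ∈ L := by
  rw [PySem.Dict.getD_foldl_modify_append]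
  simp only [PySem.Dict.getD_empty, List.nil_append, List.mem_map, List.mem_filter,
    beq_iff_eq]
  constructor
  · rintro ⟨q, ⟨hq, rfl⟩, rfl⟩
    exact hq
  · intro h
    exact ⟨(c, nb), ⟨h, rfl⟩, rfl⟩

-- A's suspicious set is exactly reachability from k
theorem pvMemA (inv : List (List Int)) (h2 : ∀ e ∈ inv, e.length = 2) (k x : Int) :
    (x ∈ pvDfsA ((pvPairs inv).foldl (fun d q => d.modify q.1 [] (· ++ [q.2])) PySem.Dict.empty)
        (inv.length + 1) PySem.Set.empty [k]) ↔ pvReach inv k x := by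
  set g := (pvPairs inv).foldl (fun d q => d.modify q.1 [] (· ++ [q.2])) PySem.Dict.empty with hg
  have hdeg : ∀ c, (g.getD c []).length = ((pvPairs inv).filter (fun q => q.1 == c)).length := by
    intro c
    rw [hg, PySem.Dict.getD_foldl_modify_append]
    simp [PySem.Dict.getD_empty]
  have hlen : ([k] : List Int).length + pvCF (pvPairs inv) PySem.Set.empty ≤ inv.length + 1 := by
    have h1 : pvCF (pvPairs inv) PySem.Set.empty ≤ (pvPairs inv).length :=
      List.length_filter_le _ _
    have h3 : (pvPairs inv).length = inv.length := List.length_map ..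
    simp only [List.length_cons, List.length_nil]
    omega
  obtain ⟨h1, hcl'⟩ := pvDfsA_complete g (pvPairs inv) hdeg (inv.length + 1)
    PySem.Set.empty [k] hlen (by intro x hx; simp [PySem.Set.empty] at hx)
  constructor
  · refine pvDfsA_sound g (pvReach inv k) ?_ (inv.length + 1) PySem.Set.empty [k]
      (by intro y hy; simp [PySem.Set.empty] at hy) ?_ x
    · intro c hc nb hnb
      rw [hg, pvGetD_mem] at hnb
      exact Relation.ReflTransGen.tail hc ((pvPairs_mem inv h2 c nb).1 hnb)
    · intro y hy
      rcases List.mem_cons.1 hy with rfl | hy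
      · exact Relation.ReflTransGen.refl
      · simp at hy
  · intro hr
    induction hr with
    | refl => exact h1 k List.mem_cons_self
    | tail hab hedge ihm =>
        rename_i b c
        refine hcl' b ihm c ?_
        rw [hg, pvGetD_mem]
        exact (pvPairs_mem inv h2 b c).2 hedge

theorem pvSweepStep_cons2 (p : PySem.Set Int × Bool) (a b : Int) (rest : List Int) :
    pvSweepStep p (a :: b :: rest) =
      if rest.isEmpty && PySem.Set.contains p.1 a && !(PySem.Set.contains p.1 b) then
        (PySem.Set.add p.1 b, true)
      else p := rfl

-- the changed flag never goes back to false
theorem pvSweep_snd_mono (inv : List (List Int)) (p : PySem.Set Int × Bool) (hp : p.2 = true) :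
    (inv.foldl pvSweepStep p).2 = true := by
  induction inv generalizing p with
  | nil => exact hp
  | cons e tl ih =>
      simp only [List.foldl_cons]
      match e with
      | [] => exact ih p hp
      | [a] => exact ih p hp
      | a :: b :: rest =>
          rw [pvSweepStep_cons2]
          split
          · exact ih _ rfl
          · exact ih p hp

-- the set only grows during a sweep
theorem pvSweep_mono' (inv : List (List Int)) (p : PySem.Set Int × Bool) (x : Int)
    (hx : x ∈ p.1) : x ∈ (inv.foldl pvSweepStep p).1 := by
  induction inv generalizing p with
  | nil => exact hx
  | cons e tl ih =>
      simp only [List.foldl_cons]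
      match e with
      | [] => exact ih p hx
      | [a] => exact ih p hx
      | a :: b :: rest =>
          rw [pvSweepStep_cons2]
          split
          · exact ih _ ((PySem.Set.mem_add _ _ _).2 (Or.inl hx))
          · exact ih p hx

theorem pvSweep_mono (inv : List (List Int)) (s : PySem.Set Int) (x : Int) (hx : x ∈ s) :
    x ∈ (pvSweep inv s).1 := pvSweep_mono' inv (s, false) x hx

-- an unchanged sweep leaves the set alone, and that set is edge-closed
theorem pvSweep_false' (inv : List (List Int)) (p : PySem.Set Int × Bool)
    (h : (inv.foldl pvSweepStep p).2 = false) :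
    (inv.foldl pvSweepStep p).1 = p.1 ∧ ∀ a b, [a, b] ∈ inv → a ∈ p.1 → b ∈ p.1 := by
  induction inv generalizing p with
  | nil => exact ⟨rfl, by simp⟩
  | cons e tl ih =>
      simp only [List.foldl_cons] at h ⊢
      match e with
      | [] =>
          obtain ⟨h1, h2⟩ := ih p h
          exact ⟨h1, fun a b hab => by
            rcases List.mem_cons.1 hab with h' | h'
            · exact absurd h' (by simp)
            · exact h2 a b h'⟩
      | [c] =>
          obtain ⟨h1, h2⟩ := ih p h
          exact ⟨h1, fun a b hab => by
            rcases List.mem_cons.1 hab with h' | h'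
            · exact absurd h' (by simp)
            · exact h2 a b h'⟩
      | a :: b :: rest =>
          rw [pvSweepStep_cons2] at h ⊢
          split at h
          · rw [pvSweep_snd_mono tl _ rfl] at h
            exact absurd h (by simp)
          · rename_i hcond
            rw [if_neg hcond]
            obtain ⟨h1, h2⟩ := ih p h
            refine ⟨h1, ?_⟩
            intro a' b' hab ha'
            rcases List.mem_cons.1 hab with h' | h'
            · obtain ⟨rfl, rfl, rfl⟩ : a = a' ∧ b = b' ∧ rest = [] := by
                simpa [eq_comm] using h'
              simp only [List.isEmpty_nil, Bool.true_and, Bool.and_eq_true,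
                Bool.not_eq_true'] at hcond
              by_contra hb'
              exact hcond ⟨(PySem.Set.contains_iff _ _).2 ha',
                by simp [PySem.Set.contains_iff, hb']⟩
            · exact h2 a' b' h' ha'

theorem pvSweep_false (inv : List (List Int)) (s : PySem.Set Int)
    (h : (pvSweep inv s).2 = false) :
    (pvSweep inv s).1 = s ∧ ∀ a b, [a, b] ∈ inv → a ∈ s → b ∈ s :=
  pvSweep_false' inv (s, false) h

theorem pvFilter_le {α : Type} (xs : List α) (p q : α → Bool)
    (h : ∀ a ∈ xs, q a = true → p a = true) :
    (xs.filter q).length ≤ (xs.filter p).length := by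
  rw [← List.countP_eq_length_filter, ← List.countP_eq_length_filter]
  exact List.countP_mono_left h

theorem pvFilter_lt {α : Type} (xs : List α) (p q : α → Bool)
    (h : ∀ a ∈ xs, q a = true → p a = true)
    (e : α) (he : e ∈ xs) (hpe : p e = true) (hqe : q e = false) :
    (xs.filter q).length < (xs.filter p).length := by
  obtain ⟨l1, l2, rfl⟩ := List.append_of_mem he
  simp only [List.filter_append, List.filter_cons, hpe, hqe, List.length_append,
    Bool.false_eq_true, if_false, if_true, List.length_cons]
  have h1 := pvFilter_le l1 p q (fun a ha => h a (by simp [ha]))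
  have h2 := pvFilter_le l2 p q (fun a ha => h a (by simp [ha]))
  omega

-- a changed sweep added some invoked endpoint that was missing
theorem pvSweep_true' (inv : List (List Int)) (p : PySem.Set Int × Bool) (hp : p.2 = false)
    (h : (inv.foldl pvSweepStep p).2 = true) :
    ∃ a b, [a, b] ∈ inv ∧ b ∉ p.1 ∧ b ∈ (inv.foldl pvSweepStep p).1 := by
  induction inv generalizing p with
  | nil => rw [List.foldl_nil, hp] at h; exact absurd h (by simp)
  | cons e tl ih =>
      simp only [List.foldl_cons] at h ⊢
      match e with
      | [] =>
          obtain ⟨a, b, h1, h2, h3⟩ := ih p hp h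
          exact ⟨a, b, List.mem_cons_of_mem _ h1, h2, h3⟩
      | [c] =>
          obtain ⟨a, b, h1, h2, h3⟩ := ih p hp h
          exact ⟨a, b, List.mem_cons_of_mem _ h1, h2, h3⟩
      | a :: b :: rest =>
          rw [pvSweepStep_cons2] at h ⊢
          split at h
          · rename_i hcond
            rw [if_pos hcond]
            simp only [Bool.and_eq_true, Bool.not_eq_true'] at hcond
            obtain ⟨⟨hre, _⟩, hbn⟩ := hcond
            refine ⟨a, b, ?_, ?_, ?_⟩
            · rw [List.isEmpty_iff] at hre
              subst hre
              exact List.mem_cons_self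
            · intro hb
              rw [(PySem.Set.contains_iff _ _).2 hb] at hbn
              exact absurd hbn (by simp)
            · exact pvSweep_mono' tl _ b ((PySem.Set.mem_add _ _ _).2 (Or.inr rfl))
          · rename_i hcond
            rw [if_neg hcond]
            obtain ⟨a', b', h1, h2, h3⟩ := ih p hp h
            exact ⟨a', b', List.mem_cons_of_mem _ h1, h2, h3⟩

-- every element of a sweep result satisfies any edge-closed predicate holding on the input set
theorem pvSweep_sound' (inv : List (List Int)) (P : Int → Prop)
    (hP : ∀ a b, [a, b] ∈ inv → P a → P b) (p : PySem.Set Int × Bool)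
    (hs : ∀ x ∈ p.1, P x) :
    ∀ x ∈ (inv.foldl pvSweepStep p).1, P x := by
  induction inv generalizing p with
  | nil => exact hs
  | cons e tl ih =>
      simp only [List.foldl_cons]
      have hPtl : ∀ a b, [a, b] ∈ tl → P a → P b :=
        fun a b hab => hP a b (List.mem_cons_of_mem _ hab)
      match e with
      | [] => exact ih hPtl p hs
      | [c] => exact ih hPtl p hs
      | a :: b :: rest =>
          rw [pvSweepStep_cons2]
          split
          · rename_i hcond
            simp only [Bool.and_eq_true, Bool.not_eq_true'] at hcond
            obtain ⟨⟨hre, hac⟩, _⟩ := hcond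
            refine ih hPtl _ ?_
            intro x hx
            rcases (PySem.Set.mem_add _ _ _).1 hx with hx | rfl
            · exact hs x hx
            · refine hP a x ?_ (hs a ((PySem.Set.contains_iff _ _).1 hac))
              rw [List.isEmpty_iff] at hre
              subst hre
              exact List.mem_cons_self
          · exact ih hPtl p hs

-- number of edges whose target is outside t (the fixpoint loop's termination measure)
def pvCM (inv : List (List Int)) (t : PySem.Set Int) : Nat :=
  (inv.filter (fun e =>
    match e with
    | _ :: b :: rest => rest.isEmpty && !(PySem.Set.contains t b)
    | _ => false)).length

theorem pvCM_dec (inv : List (List Int)) (s : PySem.Set Int)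
    (h : (pvSweep inv s).2 = true) : pvCM inv (pvSweep inv s).1 < pvCM inv s := by
  obtain ⟨a, b, h1, h2, h3⟩ := pvSweep_true' inv (s, false) rfl h
  refine pvFilter_lt inv _ _ ?_ [a, b] h1 ?_ ?_
  · intro e he hq
    match e with
    | a' :: b' :: rest =>
        simp only [Bool.and_eq_true, Bool.not_eq_true'] at hq ⊢
        refine ⟨hq.1, ?_⟩
        rcases hc : PySem.Set.contains s b' with _ | _
        · rfl
        · exact absurd (pvSweep_mono inv s b' ((PySem.Set.contains_iff _ _).1 hc))
            (by rw [← PySem.Set.contains_iff, hq.2]; simp)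
  · simp only [List.isEmpty_nil, Bool.true_and, Bool.not_eq_true']
    rcases hc : PySem.Set.contains s b with _ | _
    · rfl
    · exact absurd ((PySem.Set.contains_iff _ _).1 hc) h2
  · simp only [List.isEmpty_nil, Bool.true_and, Bool.not_eq_false]
    have hcb : PySem.Set.contains (pvSweep inv s).1 b = true :=
      (PySem.Set.contains_iff (pvSweep inv s).1 b).2 h3
    rw [hcb]
    rfl

-- with enough fuel the fixpoint loop reaches an edge-closed superset of its start
theorem pvFix_run (inv : List (List Int)) :
    ∀ (fuel : Nat) (t : PySem.Set Int), pvCM inv t < fuel →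
      (∀ x ∈ t, x ∈ pvFix inv fuel t) ∧
      (∀ a b, [a, b] ∈ inv → a ∈ pvFix inv fuel t → b ∈ pvFix inv fuel t) := by
  intro fuel
  induction fuel with
  | zero => intro t h; omega
  | succ fuel ih =>
      intro t hlt
      rcases hch : (pvSweep inv t).2 with _ | _
      · have hres : pvFix inv (fuel + 1) t = (pvSweep inv t).1 := by
          simp only [pvFix, hch]
          simp
        obtain ⟨he, hcl⟩ := pvSweep_false inv t hch
        rw [hres, he]
        exact ⟨fun x hx => hx, hcl⟩
      · have hres : pvFix inv (fuel + 1) t = pvFix inv fuel (pvSweep inv t).1 := by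
          simp only [pvFix, hch]
          simp
        have hdec := pvCM_dec inv t hch
        obtain ⟨ih1, ih2⟩ := ih (pvSweep inv t).1 (by omega)
        rw [hres]
        exact ⟨fun x hx => ih1 x (pvSweep_mono inv t x hx), ih2⟩

theorem pvFix_sound (inv : List (List Int)) (P : Int → Prop)
    (hP : ∀ a b, [a, b] ∈ inv → P a → P b) :
    ∀ (fuel : Nat) (t : PySem.Set Int), (∀ x ∈ t, P x) → ∀ x ∈ pvFix inv fuel t, P x := by
  intro fuel
  induction fuel with
  | zero => intro t ht; exact ht
  | succ fuel ih =>
      intro t ht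
      have hsw : ∀ x ∈ (pvSweep inv t).1, P x := pvSweep_sound' inv P hP (t, false) ht
      rcases hch : (pvSweep inv t).2 with _ | _
      · have hres : pvFix inv (fuel + 1) t = (pvSweep inv t).1 := by
          simp only [pvFix, hch]; simp
        rw [hres]; exact hsw
      · have hres : pvFix inv (fuel + 1) t = pvFix inv fuel (pvSweep inv t).1 := by
          simp only [pvFix, hch]; simp
        rw [hres]; exact ih (pvSweep inv t).1 hsw

-- B's suspicious set is exactly reachability from k
theorem pvMemB (inv : List (List Int)) (k x : Int) :
    (x ∈ pvFix inv (inv.length + 1) (PySem.Set.add PySem.Set.empty k)) ↔ pvReach inv k x := by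
  have hbase : ∀ y ∈ PySem.Set.add PySem.Set.empty k, y = k := by
    intro y hy
    rcases (PySem.Set.mem_add _ _ _).1 hy with hy | rfl
    · simp [PySem.Set.empty] at hy
    · rfl
  have hfuel : pvCM inv (PySem.Set.add PySem.Set.empty k) < inv.length + 1 := by
    have := List.length_filter_le (fun e =>
      match e with
      | _ :: b :: rest => rest.isEmpty && !(PySem.Set.contains (PySem.Set.add PySem.Set.empty k) b)
      | _ => false) inv
    simp only [pvCM]
    omega
  obtain ⟨h1, h2⟩ := pvFix_run inv (inv.length + 1) (PySem.Set.add PySem.Set.empty k) hfuel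
  constructor
  · refine pvFix_sound inv (pvReach inv k) ?_ (inv.length + 1) _ ?_ x
    · intro a b hab ha
      exact Relation.ReflTransGen.tail ha hab
    · intro y hy
      rw [hbase y hy]
      exact Relation.ReflTransGen.refl
  · intro hr
    induction hr with
    | refl => exact h1 k ((PySem.Set.mem_add _ _ _).2 (Or.inr rfl))
    | tail hab hedge ihm =>
        rename_i b c
        exact h2 b c hedge ihm

-- A's nested external-invocation check, over any set, equals the flat edge scan on that set
theorem pvCheck_eq (invocations : List (List Int)) (susp : PySem.Set Int) :
    (susp.any (fun m =>
        ((invocations.foldl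
          (fun (p : PySem.Dict Int (List Int) × PySem.Dict Int (List Int)) e =>
            match e with
            | [a, b] => (p.1.modify a [] (· ++ [b]), p.2.modify b [] (· ++ [a]))
            | _ => p) (PySem.Dict.empty, PySem.Dict.empty)).2.getD m []).any
          (fun a => !(PySem.Set.contains susp a)))) =
    (invocations.any (pvExternalEdge susp)) := by
  rw [Bool.eq_iff_iff]
  simp only [List.any_eq_true]
  constructor
  · rintro ⟨m, hm, h⟩
    rcases h with ⟨a, ha, hna⟩
    rcases (pvRev_mem invocations (PySem.Dict.empty, PySem.Dict.empty) a m).1 ha with h | h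
    · simp [PySem.Dict.getD_empty] at h
    · refine ⟨[a, m], h, ?_⟩
      show pvExternalEdge susp [a, m] = true
      show (List.isEmpty ([] : List Int) && PySem.Set.contains susp m && !(PySem.Set.contains susp a)) = true
      rw [List.isEmpty_nil, Bool.true_and, Bool.and_eq_true]
      exact ⟨(PySem.Set.contains_iff susp m).2 hm, hna⟩
  · rintro ⟨e, he, hp⟩
    match e, hp with
    | a :: b :: rest, hp =>
        rw [show pvExternalEdge susp (a :: b :: rest) =
          (rest.isEmpty && PySem.Set.contains susp b && !(PySem.Set.contains susp a)) from rfl]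
          at hp
        simp only [Bool.and_eq_true] at hp
        obtain ⟨⟨hre, hb⟩, hna⟩ := hp
        rw [List.isEmpty_iff] at hre
        subst hre
        refine ⟨b, (PySem.Set.contains_iff susp b).1 hb, ?_⟩
        exact ⟨a, (pvRev_mem invocations (PySem.Dict.empty, PySem.Dict.empty) a b).2 (Or.inr he),
          hna⟩

-- the flat edge scan only depends on the membership of the set
theorem pvFlat_congr (inv : List (List Int)) (s t : PySem.Set Int)
    (h : ∀ y, PySem.Set.contains s y = PySem.Set.contains t y) :
    (inv.any (pvExternalEdge s)) = (inv.any (pvExternalEdge t)) := by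
  induction inv with
  | nil => rfl
  | cons e tl ih =>
      simp only [List.any_cons, ih]
      congr 1
      match e with
      | [] => rfl
      | [a] => rfl
      | a :: b :: rest =>
          show (rest.isEmpty && PySem.Set.contains s b && !(PySem.Set.contains s a)) =
            (rest.isEmpty && PySem.Set.contains t b && !(PySem.Set.contains t a))
          rw [h a, h b]
-- (pvExternalEdge unfolds definitionally in the cons-cons case above)

-- ===== VERDICT (by name: the statement is the Claim_ definition above) =====
theorem remainingMethods_spec : Claim_equal_remainingMethods := by
  intro n k invocations _ hpre
  show remainingMethods n k invocations = remainingMethods_alt n k invocations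
  simp only [remainingMethods, remainingMethods_alt]
  rw [pvGraphs_fst invocations (PySem.Dict.empty, PySem.Dict.empty) hpre]
  set suspA := pvDfsA
    ((pvPairs invocations).foldl (fun d q => d.modify q.1 [] (· ++ [q.2])) PySem.Dict.empty)
    (invocations.length + 1) PySem.Set.empty [k] with hA
  set suspB := pvFix invocations (invocations.length + 1) (PySem.Set.add PySem.Set.empty k)
    with hB
  have hmem : ∀ y, y ∈ suspA ↔ y ∈ suspB := by
    intro y
    rw [hA, hB, pvMemA invocations hpre k y, pvMemB invocations k y]
  have hcont : ∀ y, PySem.Set.contains suspA y = PySem.Set.contains suspB y := by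
    intro y
    rw [Bool.eq_iff_iff, PySem.Set.contains_iff, PySem.Set.contains_iff]
    exact hmem y
  rw [pvCheck_eq invocations suspA, pvFlat_congr invocations suspA suspB hcont]
  split
  · rfl
  · exact List.filter_congr (fun i _ => by rw [hcont i])
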